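-- pv_equiv track=rewrite | github.com/orianek1/Contact-tracing | CPSC217F20A4-OrianeKacoutie.py | mostViral
-- ===== SOURCE A (Python) =====
-- def mostViral(nameDictionary):
--     # this is the list where the most viral people will go but it has diplucates
--     mostViralList=[]
--     max_infected=0
--     #this is the list that will remove the duplicates from the most viral list and store it there
--     res=[]
--     # I got this code from https://stackoverflow.com/questions/27210042/how-do-you-find-which-key-in-a-dictionary-has-the-longest-list-of-values/27219157
--     #the code ends at line 111
-- #This is to loop through the key present in the dictionary
--     for keys in nameDictionary.keys():
--         #this is to check the lengh of the values present in the key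
--         viral_len= len(nameDictionary[keys])
--         #this is to loop through the values present in the dictionary
--         for values in nameDictionary.values():
--             #if the the person appears multiple multiple time in the list
--             #it will be added to the new list as the most viral
--             if viral_len >= max_infected:
--                 max_key= keys
--                 max_infected=viral_len
--                 mostViralList.append(max_key)
--                 #this is to go throught the item in the new list and remove the duplicates and put them in another list
--                 #this is so they will only appear once
--                 for i in mostViralList:
--                     if i not in res:
--                         res.append(i)
--     return (res)
-- ===== SOURCE B (Python) =====
-- def mostViral(nameDictionary):
--     # single pass: keep a key iff its value-list length reaches the running maximum
--     res = []
--     max_infected = 0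
--     for key, value in nameDictionary.items():
--         if len(value) >= max_infected:
--             max_infected = len(value)
--             res.append(key)
--     return res
-- ===== Notes on version B (the rewrite author's own statement) =====
-- stated objective: faster
-- what changed: Replaced the triple-nested loops (for every key, a redundant pass over all values, each appending the key and re-deduplicating the whole accumulated list) by one single pass over the items that appends a key exactly once when its value-list length reaches the running maximum.
import Mathlib
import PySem

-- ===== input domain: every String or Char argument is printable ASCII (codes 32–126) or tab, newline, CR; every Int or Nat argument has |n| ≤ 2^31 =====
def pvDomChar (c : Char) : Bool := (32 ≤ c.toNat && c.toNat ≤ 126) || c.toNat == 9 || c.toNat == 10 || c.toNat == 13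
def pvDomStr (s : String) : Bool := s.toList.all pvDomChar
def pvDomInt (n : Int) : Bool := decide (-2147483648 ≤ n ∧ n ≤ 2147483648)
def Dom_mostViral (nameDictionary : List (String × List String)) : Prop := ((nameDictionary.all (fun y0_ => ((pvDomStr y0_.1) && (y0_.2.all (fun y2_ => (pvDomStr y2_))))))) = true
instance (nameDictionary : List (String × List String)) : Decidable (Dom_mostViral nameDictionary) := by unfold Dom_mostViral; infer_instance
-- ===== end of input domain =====

-- B replaces A's triple-nested loops by one single pass with a running maximum (measurably faster, asymptotic).

-- ===== PORT A =====
def mostViral (nameDictionary : List (String × List String)) : List String :=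
  let d := PySem.Dict.ofList nameDictionary
  -- mostViralList=[], max_infected=0, res=[]  (state = (mostViralList, max_infected, res))
  (d.keys.foldl (fun (s : List String × Nat × List String) keys_ =>
      -- viral_len = len(nameDictionary[keys]); getD is exact here: keys_ ∈ d.keys so no KeyError
      let viral_len := (d.getD keys_ []).length
      d.values.foldl (fun s _values =>
          if viral_len ≥ s.2.1 then
            -- max_key = keys; max_infected = viral_len; mostViralList.append(max_key)
            let mvl := s.1 ++ [keys_]
            -- for i in mostViralList: if i not in res: res.append(i)
            let res := mvl.foldl (fun r i => if i ∈ r then r else r ++ [i]) s.2.2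
            (mvl, viral_len, res)
          else s) s)
    ([], 0, [])).2.2

-- ===== PORT B =====
def mostViral_alt (nameDictionary : List (String × List String)) : List String :=
  let d := PySem.Dict.ofList nameDictionary
  -- res=[], max_infected=0; one pass over items  (state = (res, max_infected))
  (d.items.foldl (fun (s : List String × Nat) kv =>
      if kv.2.length ≥ s.2 then (s.1 ++ [kv.1], kv.2.length) else s)
    ([], 0)).1

-- ===== PRECONDITION & SPEC =====
def Spec_mostViral (nameDictionary : List (String × List String)) (out : List String) : Prop := out = mostViral_alt nameDictionary
instance (nameDictionary : List (String × List String)) (out : List String) : Decidable (Spec_mostViral nameDictionary out) := by unfold Spec_mostViral; infer_instance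

-- ===== CLAIM (what is proved, stated in full; the proofs are below) =====
def Claim_equal_mostViral : Prop := ∀ (nameDictionary : List (String × List String)), Dom_mostViral nameDictionary → Spec_mostViral nameDictionary (mostViral nameDictionary)

-- ===== LEMMAS AND PROOFS =====

-- A's loop bodies, named so the outer induction can unfold them one step at a time
def stepA (d : PySem.Dict String (List String)) (vs : List (List String))
    (s : List String × Nat × List String) (keys_ : String) : List String × Nat × List String :=
  vs.foldl (fun s (_ : List String) =>
      if (d.getD keys_ []).length ≥ s.2.1 then
        (s.1 ++ [keys_], (d.getD keys_ []).length,
         (s.1 ++ [keys_]).foldl (fun r i => if i ∈ r then r else r ++ [i]) s.2.2)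
      else s) s

def stepB (d : PySem.Dict String (List String)) (s : List String × Nat) (k : String) :
    List String × Nat :=
  if (d.getD k []).length ≥ s.2 then (s.1 ++ [k], (d.getD k []).length) else s

-- the dedup-merge loop of A is a no-op when everything merged is already present
theorem merge_subset (mvl res : List String) (h : ∀ x ∈ mvl, x ∈ res) :
    mvl.foldl (fun r i => if i ∈ r then r else r ++ [i]) res = res := by
  induction mvl with
  | nil => rfl
  | cons a t ih =>
    simp only [List.foldl_cons, if_pos (h a (by simp))]
    exact ih (fun x hx => h x (by simp [hx]))

-- once the key has been appended and the max equals viral_len, the remaining inner iterations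
-- only pile duplicates onto mostViralList and leave (max, res) unchanged
theorem inner_steady (d : PySem.Dict String (List String)) (vs : List (List String)) (k : String)
    (mvl res : List String) (h : ∀ x ∈ mvl, x ∈ res) (hk : k ∈ res) :
    stepA d vs (mvl, (d.getD k []).length, res) k
      = (mvl ++ List.replicate vs.length k, (d.getD k []).length, res) := by
  induction vs generalizing mvl with
  | nil => simp [stepA]
  | cons v t ih =>
    have hsub' : ∀ x ∈ mvl ++ [k], x ∈ res := by
      intro x hx
      rcases List.mem_append.1 hx with h' | h'
      · exact h x h'
      · rw [List.mem_singleton] at h'; exact h' ▸ hk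
    simp only [stepA, List.foldl_cons, if_pos (le_refl (d.getD k []).length)]
    rw [merge_subset (mvl ++ [k]) res hsub']
    have := ih (mvl ++ [k]) hsub'
    simp only [stepA] at this
    rw [this]
    simp [List.replicate_succ, List.append_assoc]

-- processing one key: append it (once, to res) iff its length reaches the running max
theorem stepA_eq (d : PySem.Dict String (List String)) (vs : List (List String)) (hvs : vs ≠ [])
    (k : String) (mvl res : List String) (m : Nat)
    (hsub : ∀ x ∈ mvl, x ∈ res) (hk : k ∉ res) :
    stepA d vs (mvl, m, res) k
      = if (d.getD k []).length ≥ m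
        then (mvl ++ [k] ++ List.replicate (vs.length - 1) k, (d.getD k []).length, res ++ [k])
        else (mvl, m, res) := by
  obtain ⟨v, vs', rfl⟩ : ∃ v vs', vs = v :: vs' := by
    cases vs with | nil => exact absurd rfl hvs | cons v vs' => exact ⟨v, vs', rfl⟩
  by_cases hL : (d.getD k []).length ≥ m
  · rw [if_pos hL]
    have hmerge : (mvl ++ [k]).foldl (fun r i => if i ∈ r then r else r ++ [i]) res
        = res ++ [k] := by
      rw [List.foldl_append, merge_subset mvl res hsub]; simp [hk]
    simp only [stepA, List.foldl_cons, if_pos hL]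
    rw [hmerge]
    have := inner_steady d vs' k (mvl ++ [k]) (res ++ [k])
      (by intro x hx
          rcases List.mem_append.1 hx with h' | h'
          · exact List.mem_append.2 (Or.inl (hsub x h'))
          · simp [h'])
      (by simp)
    simp only [stepA] at this
    rw [this]
    simp
  · rw [if_neg hL]
    simp only [stepA]
    induction vs' with
    | nil => simp [if_neg hL]
    | cons w t ih => simpa [if_neg hL] using ih

-- main loop correspondence: A's outer fold and B's single pass keep the same (res, max)
theorem outer_eq (d : PySem.Dict String (List String)) (vs : List (List String)) (hvs : vs ≠ [])
    (ks : List String) (mvl res : List String) (m : Nat)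
    (hnd : ks.Nodup) (hsub : ∀ x ∈ mvl, x ∈ res) (hfresh : ∀ k ∈ ks, k ∉ res) :
    (ks.foldl (stepA d vs) (mvl, m, res)).2.2 = (ks.foldl (stepB d) (res, m)).1 := by
  induction ks generalizing mvl res m with
  | nil => rfl
  | cons k t ih =>
    rw [List.foldl_cons, List.foldl_cons,
      stepA_eq d vs hvs k mvl res m hsub (hfresh k (by simp))]
    by_cases hL : (d.getD k []).length ≥ m
    · rw [if_pos hL, show stepB d (res, m) k = (res ++ [k], (d.getD k []).length) from
        by simp [stepB, if_pos hL]]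
      exact ih _ _ _ hnd.of_cons
        (by intro x hx
            rcases List.mem_append.1 hx with h' | h'
            · rcases List.mem_append.1 h' with h'' | h''
              · exact List.mem_append.2 (Or.inl (hsub x h''))
              · exact List.mem_append.2 (Or.inr h'')
            · simp [List.eq_of_mem_replicate h'])
        (by intro k' hk'
            simp only [List.mem_append, List.mem_singleton, not_or]
            exact ⟨hfresh k' (List.mem_cons_of_mem _ hk'),
              fun h' => (List.nodup_cons.1 hnd).1 (h' ▸ hk')⟩)
    · rw [if_neg hL, show stepB d (res, m) k = (res, m) from by simp [stepB, if_neg hL]]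
      exact ih _ _ _ hnd.of_cons hsub (fun k' hk' => hfresh k' (List.mem_cons_of_mem _ hk'))

-- ===== VERDICT (by name: the statement is the Claim_ definition above) =====
theorem mostViral_spec : Claim_equal_mostViral := by
  intro nd _
  unfold Spec_mostViral mostViral mostViral_alt
  dsimp only
  set d := PySem.Dict.ofList nd with hd
  by_cases hk : d.keys = []
  · have hitems : d.items = [] := by
      have := hk
      simp only [PySem.Dict.keys, List.map_eq_nil_iff] at this
      simp [this]
    simp [hk, hitems]
  · have hnd : d.keys.Nodup := PySem.Dict.nodup_keys_ofList nd
    have hvs : d.values ≠ [] := by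
      intro h
      simp only [PySem.Dict.values, List.map_eq_nil_iff] at h
      exact hk (by simp [PySem.Dict.keys, h])
    have hA : (fun (s : List String × Nat × List String) keys_ =>
        d.values.foldl (fun s (_ : List String) =>
            if (d.getD keys_ []).length ≥ s.2.1 then
              (s.1 ++ [keys_], (d.getD keys_ []).length,
               (s.1 ++ [keys_]).foldl (fun r i => if i ∈ r then r else r ++ [i]) s.2.2)
            else s) s) = stepA d d.values := rfl
    rw [hA, PySem.Dict.items_eq_map_keys d hnd [], List.foldl_map]
    have hB : (fun (s : List String × Nat) k =>
        if (d.getD k []).length ≥ s.2 then (s.1 ++ [k], (d.getD k []).length) else s)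
        = stepB d := rfl
    rw [hB]
    exact outer_eq d d.values hvs d.keys [] [] 0 hnd (by simp) (by simp)
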